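-- pv_equiv track=rewrite | github.com/VUP-Linux/vup | vup/scripts/config.py | arch_supported
-- ===== SOURCE A (Python) =====
-- def arch_supported(archs_list, target_arch):
--     """
--     Check if target_arch is supported given the archs list from template.
--     Handles negation (~arch) and 'noarch'.
--     """
--     if archs_list is None:
--         return True  # No restriction
--
--     # Check for noarch
--     if "noarch" in archs_list:
--         return True
--
--     # Check for negations
--     negated = [a[1:] for a in archs_list if a.startswith('~')]
--     if negated:
--         # If there are negations, arch is supported unless explicitly negated
--         return target_arch not in negated
--
--     # Positive list - arch must be in it
--     return target_arch in archs_list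
-- ===== SOURCE B (Python) =====
-- def arch_supported(archs_list, target_arch):
--     """
--     Check if target_arch is supported given the archs list from template.
--     Handles negation (~arch) and 'noarch'.
--
--     Each entry is scored by precedence (noarch=4 > negated-target=3 >
--     other-negation=2 > target=1 > other=0); the verdict is a table lookup
--     at the maximum score.
--     """
--     if archs_list is None:
--         return True  # No restriction
--
--     negated_target = "~" + target_arch
--
--     def rank(a):
--         if a == "noarch":
--             return 4
--         if a == negated_target:
--             return 3
--         if a.startswith("~"):
--             return 2
--         if a == target_arch:
--             return 1
--         return 0
--
--     return (False, True, True, False, True)[max(map(rank, archs_list), default=0)]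
-- ===== Notes on version B (the rewrite author's own statement) =====
-- stated objective: alternative
-- what changed: Replaced A's staged membership tests and intermediate negated list with a precedence-scoring reduction: each entry is mapped to a rank (noarch=4, ~target=3, other negation=2, target=1, other=0), the maximum rank is taken in one pass and the verdict is a lookup in a fixed truth table.
import Mathlib
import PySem

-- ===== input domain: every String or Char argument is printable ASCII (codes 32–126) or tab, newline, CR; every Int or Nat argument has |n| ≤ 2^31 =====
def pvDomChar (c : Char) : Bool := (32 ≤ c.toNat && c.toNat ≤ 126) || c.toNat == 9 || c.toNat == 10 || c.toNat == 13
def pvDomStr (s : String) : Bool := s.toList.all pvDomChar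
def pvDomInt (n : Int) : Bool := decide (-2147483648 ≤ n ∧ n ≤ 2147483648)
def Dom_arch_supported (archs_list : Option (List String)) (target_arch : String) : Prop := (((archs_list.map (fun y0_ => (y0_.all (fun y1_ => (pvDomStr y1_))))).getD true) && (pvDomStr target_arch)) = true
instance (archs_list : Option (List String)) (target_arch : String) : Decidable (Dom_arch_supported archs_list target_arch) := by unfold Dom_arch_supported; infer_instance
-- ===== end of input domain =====

-- B replaces A's staged membership tests and intermediate negated list with a
-- precedence-scoring max-reduction over the entries plus a fixed verdict table
-- (alternative decomposition, same cost).


-- ===== PORT A =====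
-- literal transliteration of A: None guard, 'noarch' membership, build the negated list
-- (comprehension with startswith and a[1:]), then the two membership tests.
def arch_supported (archs_list : Option (List String)) (target_arch : String) : Bool :=
  match archs_list with
  | none => true
  | some l =>
    if l.contains "noarch" then true
    else
      let negated := (l.filter (fun a => PySem.Str.startswith a "~")).map
        (fun a => PySem.Str.slice a (some 1) none)
      if negated ≠ [] then !(negated.contains target_arch)
      else l.contains target_arch

-- ===== PORT B =====
-- Source B's rank function (the nested 'def rank'), transcribed branch for branch.
def archRank (target_arch : String) (a : String) : Nat :=
  if a == "noarch" then 4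
  else if a == "~" ++ target_arch then 3
  else if PySem.Str.startswith a "~" then 2
  else if a == target_arch then 1
  else 0

-- max(map(rank, archs_list), default=0) is the left fold of Nat.max over the mapped
-- list (default 0 on empty); the tuple index is always in range (rank ∈ 0..4), so
-- the faithful port of the tuple lookup is getD with an unreachable default.
def arch_supported_alt (archs_list : Option (List String)) (target_arch : String) : Bool :=
  match archs_list with
  | none => true
  | some l =>
    let m : Nat :=
      match l.map (archRank target_arch) with
      | [] => 0
      | x :: xs => xs.foldl Nat.max x
    [false, true, true, false, true].getD m false

-- ===== PRECONDITION & SPEC =====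
def Spec_arch_supported (archs_list : Option (List String)) (target_arch : String) (out : Bool) : Prop := out = arch_supported_alt archs_list target_arch
instance (archs_list : Option (List String)) (target_arch : String) (out : Bool) : Decidable (Spec_arch_supported archs_list target_arch out) := by unfold Spec_arch_supported; infer_instance

-- ===== CLAIM (what is proved, stated in full; the proofs are below) =====
def Claim_equal_arch_supported : Prop := ∀ (archs_list : Option (List String)) (target_arch : String), Dom_arch_supported archs_list target_arch → Spec_arch_supported archs_list target_arch (arch_supported archs_list target_arch)

-- ===== LEMMAS AND PROOFS =====

theorem startswith_tilde_chars (t : String) :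
    PySem.Chars.startswith ('~' :: t.toList) ['~'] = true := by
  rw [PySem.Chars.startswith_iff]
  exact ⟨t.toList, rfl⟩

theorem startswith_tilde_append (t : String) :
    PySem.Str.startswith ("~" ++ t) "~" = true := by
  simp only [PySem.Str.startswith_eq, PySem.Chars.startswith_iff, String.toList_append]
  exact List.prefix_append _ _

-- a starts with '~' and a[1:] = t  ⟺  a = "~" + t
theorem tilde_slice_iff (a t : String) :
    (PySem.Str.startswith a "~" = true ∧ PySem.Str.slice a (some 1) none = t) ↔
      a = "~" ++ t := by
  rw [← String.toList_inj (s₁ := a) (s₂ := "~" ++ t)]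
  rw [← String.toList_inj (s₁ := PySem.Str.slice a (some 1) none) (s₂ := t)]
  simp only [PySem.Str.startswith_eq, PySem.Chars.startswith_iff,
    PySem.Str.toList_slice, PySem.Chars.slice_eq_listSlice, PySem.List.slice_from_one,
    String.toList_append]
  constructor
  · rintro ⟨⟨cs, hcs⟩, h2⟩
    cases hl : a.toList with
    | nil => simp [hl] at hcs
    | cons c rest =>
      rw [hl] at hcs h2
      simp at hcs h2
      simp [← hcs.1, h2]
  · intro h
    rw [h]
    simp

theorem rank_ge4 (t a : String) : 4 ≤ archRank t a ↔ a = "noarch" := by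
  unfold archRank; split_ifs <;> simp_all

theorem rank_ge3 (t a : String) : 3 ≤ archRank t a ↔ a = "noarch" ∨ a = "~" ++ t := by
  unfold archRank; split_ifs <;> simp_all

theorem rank_ge2 (t a : String) :
    2 ≤ archRank t a ↔ a = "noarch" ∨ PySem.Str.startswith a "~" = true := by
  unfold archRank
  split_ifs with h1 h2 h3 <;> simp_all
  exact startswith_tilde_chars t

theorem rank_ge1 (t a : String) :
    1 ≤ archRank t a ↔
      a = "noarch" ∨ PySem.Str.startswith a "~" = true ∨ a = t := by
  unfold archRank
  split_ifs with h1 h2 h3 h4 <;> simp_all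
  exact startswith_tilde_chars t

-- the fold in B computes the foldr-max of the ranks
theorem foldl_max_eq (ns : List Nat) (m : Nat) :
    ns.foldl Nat.max m = Nat.max m (ns.foldr Nat.max 0) := by
  induction ns generalizing m with
  | nil => simp
  | cons x xs ih => simp [List.foldl_cons, ih, Nat.max_assoc]

def supR (t : String) (l : List String) : Nat :=
  (l.map (archRank t)).foldr Nat.max 0

theorem supR_le_four (t : String) (l : List String) : supR t l ≤ 4 := by
  induction l with
  | nil => simp [supR]
  | cons a l ih =>
    simp only [supR, List.map_cons, List.foldr_cons]
    have : archRank t a ≤ 4 := by unfold archRank; split_ifs <;> omega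
    exact Nat.max_le.mpr ⟨this, ih⟩

theorem le_supR_iff (t : String) (l : List String) (k : Nat) (hk : 1 ≤ k) :
    k ≤ supR t l ↔ ∃ a ∈ l, k ≤ archRank t a := by
  have hmax : ∀ x y : Nat, k ≤ Nat.max x y ↔ k ≤ x ∨ k ≤ y := fun x y => le_max_iff
  induction l with
  | nil => simp [supR]; omega
  | cons a l ih =>
    simp only [supR, List.map_cons, List.foldr_cons, List.mem_cons]
    rw [hmax]
    constructor
    · rintro (h | h)
      · exact ⟨a, Or.inl rfl, h⟩
      · obtain ⟨b, hb, hkb⟩ := ih.mp h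
        exact ⟨b, Or.inr hb, hkb⟩
    · rintro ⟨b, (rfl | hb), hkb⟩
      · exact Or.inl hkb
      · exact Or.inr (ih.mpr ⟨b, hb, hkb⟩)

theorem altB (t : String) (l : List String) :
    arch_supported_alt (some l) t
      = [false, true, true, false, true].getD (supR t l) false := by
  cases l with
  | nil => rfl
  | cons a as =>
    show [false, true, true, false, true].getD
        ((as.map (archRank t)).foldl Nat.max (archRank t a)) false = _
    rw [foldl_max_eq]
    rfl

theorem main_eq (l : List String) (t : String) :
    arch_supported (some l) t = arch_supported_alt (some l) t := by
  rw [altB]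
  have h4 := supR_le_four t l
  have e4 := le_supR_iff t l 4 (by omega)
  have e3 := le_supR_iff t l 3 (by omega)
  have e2 := le_supR_iff t l 2 (by omega)
  have e1 := le_supR_iff t l 1 (by omega)
  simp only [rank_ge4, rank_ge3, rank_ge2, rank_ge1] at e4 e3 e2 e1
  -- A as an if over the three propositions it tests
  have c1 : l.contains "noarch" = decide (∃ a ∈ l, a = "noarch") := by
    simp
  have c2 : ((l.filter (fun a => PySem.Str.startswith a "~")).map
      (fun a => PySem.Str.slice a (some 1) none) ≠ [])
      ↔ ∃ a ∈ l, PySem.Str.startswith a "~" = true := by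
    simp only [ne_eq, List.map_eq_nil_iff, List.filter_eq_nil_iff]
    push Not
    simp
  have c3 : ((l.filter (fun a => PySem.Str.startswith a "~")).map
      (fun a => PySem.Str.slice a (some 1) none)).contains t
      = decide (∃ a ∈ l, a = "~" ++ t) := by
    have h1 : ∀ (xs : List String), xs.contains t = decide (t ∈ xs) := by
      intro xs; simp
    rw [h1, decide_eq_decide]
    simp only [List.mem_map, List.mem_filter]
    constructor
    · rintro ⟨a, ⟨ha, hs⟩, hf⟩
      exact ⟨a, ha, (tilde_slice_iff a t).mp ⟨hs, hf⟩⟩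
    · rintro ⟨a, ha, he⟩
      obtain ⟨hs, hf⟩ := (tilde_slice_iff a t).mpr he
      exact ⟨a, ⟨ha, hs⟩, hf⟩
  have c4 : l.contains t = decide (t ∈ l) := by simp
  have hA : arch_supported (some l) t
      = (if ∃ a ∈ l, a = "noarch" then true
         else if ∃ a ∈ l, PySem.Str.startswith a "~" = true then
           !(decide (∃ a ∈ l, a = "~" ++ t))
         else decide (t ∈ l)) := by
    show (if l.contains "noarch" = true then true
          else if (l.filter (fun a => PySem.Str.startswith a "~")).map
              (fun a => PySem.Str.slice a (some 1) none) ≠ [] then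
            !(((l.filter (fun a => PySem.Str.startswith a "~")).map
              (fun a => PySem.Str.slice a (some 1) none)).contains t)
          else l.contains t) = _
    rw [c1, c3, c4]
    simp only [decide_eq_true_eq, c2]
  rw [hA]
  by_cases hN : ∃ a ∈ l, a = "noarch"
  · have : 4 ≤ supR t l := e4.mpr hN
    have hm : supR t l = 4 := by omega
    rw [if_pos hN, hm]
    decide
  · by_cases hT : ∃ a ∈ l, a = "~" ++ t
    · have : 3 ≤ supR t l :=
        e3.mpr (by obtain ⟨a, ha, he⟩ := hT; exact ⟨a, ha, Or.inr he⟩)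
      have hnot4 : ¬ 4 ≤ supR t l := fun h => hN (e4.mp h)
      have hm : supR t l = 3 := by omega
      have hG : ∃ a ∈ l, PySem.Str.startswith a "~" = true := by
        obtain ⟨a, ha, he⟩ := hT
        exact ⟨a, ha, he ▸ startswith_tilde_append t⟩
      rw [if_neg hN, if_pos hG, decide_eq_true hT, hm]
      rfl
    · by_cases hG : ∃ a ∈ l, PySem.Str.startswith a "~" = true
      · have : 2 ≤ supR t l :=
          e2.mpr (by obtain ⟨a, ha, he⟩ := hG; exact ⟨a, ha, Or.inr he⟩)
        have hnot3 : ¬ 3 ≤ supR t l := fun h => by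
          obtain ⟨a, ha, he⟩ := e3.mp h
          cases he with
          | inl h' => exact hN ⟨a, ha, h'⟩
          | inr h' => exact hT ⟨a, ha, h'⟩
        have hm : supR t l = 2 := by omega
        rw [if_neg hN, if_pos hG, decide_eq_false hT, hm]
        rfl
      · by_cases hP : t ∈ l
        · have : 1 ≤ supR t l := e1.mpr ⟨t, hP, Or.inr (Or.inr rfl)⟩
          have hnot2 : ¬ 2 ≤ supR t l := fun h => by
            obtain ⟨a, ha, he⟩ := e2.mp h
            cases he with
            | inl h' => exact hN ⟨a, ha, h'⟩
            | inr h' => exact hG ⟨a, ha, h'⟩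
          have hm : supR t l = 1 := by omega
          rw [if_neg hN, if_neg hG, decide_eq_true hP, hm]
          decide
        · have hnot1 : ¬ 1 ≤ supR t l := fun h => by
            obtain ⟨a, ha, he⟩ := e1.mp h
            rcases he with h' | h' | h'
            · exact hN ⟨a, ha, h'⟩
            · exact hG ⟨a, ha, h'⟩
            · exact hP (h' ▸ ha)
          have hm : supR t l = 0 := by omega
          rw [if_neg hN, if_neg hG, decide_eq_false hP, hm]
          decide

-- ===== VERDICT (by name: the statement is the Claim_ definition above) =====
theorem arch_supported_spec : Claim_equal_arch_supported := by
  intro archs_list target_arch _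
  unfold Spec_arch_supported
  match archs_list with
  | none => rfl
  | some l => exact main_eq l target_arch
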